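-- pv_equiv track=rewrite | github.com/amniskin/NCF-DataStorageAndRetrieval-Assignments | a3/q5a.py | replaceOdds
-- ===== SOURCE A (Python) =====
-- def replaceOdds(arr, a, b):
--     #python doesn't come with a native copy function, so the line below is a way of copying the list
--     retVal = arr[:]
--     for i in range(len(retVal)):
--         if (i % 2 == 1):
--             retVal[i] = retVal[i].replace(a, b).strip()
--         else:
--             retVal[i] = retVal[i].strip()
--     return retVal
-- ===== SOURCE B (Python) =====
-- def replaceOdds(arr, a, b):
--     out = []
--     n = len(arr)
--     i = 0
--     while i + 1 < n:
--         out.append(arr[i].strip())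
--         out.append(arr[i + 1].replace(a, b).strip())
--         i += 2
--     if i < n:
--         out.append(arr[i].strip())
--     return out
-- ===== Notes on version B (the rewrite author's own statement) =====
-- stated objective: alternative
-- what changed: Instead of copying the list and overwriting each slot in place under a parity test, B builds a fresh output in a single while loop that consumes the input two elements per step (even element stripped, odd element replaced-then-stripped), with one trailing element handled after the loop, so no index-parity branch and no in-place mutation remain.
import Mathlib
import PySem

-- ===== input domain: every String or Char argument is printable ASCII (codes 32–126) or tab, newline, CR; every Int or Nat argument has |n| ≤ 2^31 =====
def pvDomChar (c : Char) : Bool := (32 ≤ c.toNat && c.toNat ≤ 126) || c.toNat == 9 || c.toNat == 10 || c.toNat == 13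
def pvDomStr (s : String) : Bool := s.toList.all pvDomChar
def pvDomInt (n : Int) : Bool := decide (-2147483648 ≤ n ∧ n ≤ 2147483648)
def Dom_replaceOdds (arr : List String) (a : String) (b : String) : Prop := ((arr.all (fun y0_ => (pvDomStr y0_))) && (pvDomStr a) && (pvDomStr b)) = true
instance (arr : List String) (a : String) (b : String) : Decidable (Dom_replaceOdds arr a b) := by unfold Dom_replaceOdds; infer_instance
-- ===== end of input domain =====

-- B rebuilds the output two elements per loop step instead of A's copy-then-overwrite-by-index
-- with a parity branch; same cost, alternative structure. (Equal return values; neither mutates.)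

-- ===== PORT A =====
-- retVal = arr[:]; for i in range(len(retVal)): if i % 2 == 1: retVal[i] = retVal[i].replace(a,b).strip() else: retVal[i] = retVal[i].strip()
-- indices from range(len(retVal)) are always in range, so pyGetD/pySetD are exact here
def replaceOdds (arr : List String) (a : String) (b : String) : List String :=
  let retVal := arr
  (PySem.List.pyRange 0 (PySem.List.len retVal) 1).foldl
    (fun r i =>
      if PySem.Int.mod i 2 == 1 then
        PySem.List.pySetD r i (PySem.Str.strip (PySem.Str.replace (PySem.List.pyGetD r i "") a b))
      else
        PySem.List.pySetD r i (PySem.Str.strip (PySem.List.pyGetD r i ""))) retVal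

-- ===== PORT B =====
-- while i + 1 < n: append arr[i].strip(); append arr[i+1].replace(a,b).strip(); i += 2
-- indices i, i+1 are in range whenever read, so pyGetD is exact here
def replaceOddsAltLoop (arr : List String) (a : String) (b : String) (out : List String) (i : Int) : List String :=
  if i + 1 < PySem.List.len arr then
    replaceOddsAltLoop arr a b
      (out ++ [PySem.Str.strip (PySem.List.pyGetD arr i ""),
               PySem.Str.strip (PySem.Str.replace (PySem.List.pyGetD arr (i + 1) "") a b)])
      (i + 2)
  else if i < PySem.List.len arr then
    out ++ [PySem.Str.strip (PySem.List.pyGetD arr i "")]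
  else out
termination_by (PySem.List.len arr - i).toNat
decreasing_by simp only [PySem.List.len_eq] at *; omega

def replaceOdds_alt (arr : List String) (a : String) (b : String) : List String :=
  replaceOddsAltLoop arr a b [] 0

-- ===== PRECONDITION & SPEC =====
def Spec_replaceOdds (arr : List String) (a : String) (b : String) (out : List String) : Prop := out = replaceOdds_alt arr a b
instance (arr : List String) (a : String) (b : String) (out : List String) : Decidable (Spec_replaceOdds arr a b out) := by unfold Spec_replaceOdds; infer_instance

-- ===== CLAIM (what is proved, stated in full; the proofs are below) =====
def Claim_equal_replaceOdds : Prop := ∀ (arr : List String) (a : String) (b : String), Dom_replaceOdds arr a b → Spec_replaceOdds arr a b (replaceOdds arr a b)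

-- ===== LEMMAS AND PROOFS =====

-- the common canonical value: elementwise map with an index-parity choice
def pvF (a b : String) (i : Nat) (x : String) : String :=
  if i % 2 = 1 then PySem.Str.strip (PySem.Str.replace x a b) else PySem.Str.strip x

theorem pvMapIdx_take_succ (arr : List String) (a b : String) (k : Nat) (hk : k < arr.length) :
    (arr.take (k + 1)).mapIdx (pvF a b) = (arr.take k).mapIdx (pvF a b) ++ [pvF a b k arr[k]] := by
  have h : arr.take (k + 1) = arr.take k ++ [arr[k]] := by
    rw [List.take_add_one, List.getElem?_eq_getElem hk]
    rfl
  rw [h, List.mapIdx_append]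
  simp [Nat.min_eq_left hk.le]

theorem pvGet_mid (pre rest : List String) (x d : String) (k : Nat) (hl : pre.length = k) :
    PySem.List.pyGetD (pre ++ x :: rest) (k : Int) d = x := by
  subst hl
  simp [PySem.List.pyGetD_natCast, List.getD]

theorem pvSet_mid (pre rest : List String) (x v : String) (k : Nat) (hl : pre.length = k) :
    PySem.List.pySetD (pre ++ x :: rest) (k : Int) v = pre ++ v :: rest := by
  subst hl
  rw [PySem.List.pySetD_natCast, List.set_append]
  simp

theorem pvMod2 (k : Nat) : (PySem.Int.mod (k : Int) 2 == 1) = decide (k % 2 = 1) := by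
  rw [show (2 : Int) = ((2 : Nat) : Int) from rfl, PySem.Int.mod_natCast]
  by_cases h : k % 2 = 1 <;> simp [h]
  omega

theorem pvF_even (a b : String) (k : Nat) (x : String) (h : k % 2 = 0) :
    pvF a b k x = PySem.Str.strip x := by
  unfold pvF; rw [if_neg (by omega)]

theorem pvF_odd (a b : String) (k : Nat) (x : String) (h : k % 2 = 1) :
    pvF a b k x = PySem.Str.strip (PySem.Str.replace x a b) := by
  unfold pvF; rw [if_pos h]

theorem pvA_loop (arr : List String) (a b : String) (k : Nat) (hk : k ≤ arr.length) :
    (PySem.List.pyRange (k : Int) (arr.length : Int) 1).foldl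
      (fun r i =>
        if PySem.Int.mod i 2 == 1 then
          PySem.List.pySetD r i (PySem.Str.strip (PySem.Str.replace (PySem.List.pyGetD r i "") a b))
        else
          PySem.List.pySetD r i (PySem.Str.strip (PySem.List.pyGetD r i "")))
      ((arr.take k).mapIdx (pvF a b) ++ arr.drop k)
    = arr.mapIdx (pvF a b) := by
  induction hn : arr.length - k generalizing k with
  | zero =>
    have hk' : k = arr.length := by omega
    subst hk'
    rw [PySem.List.pyRange_one_eq_nil (by omega)]
    simp
  | succ m ih =>
    have hklt : k < arr.length := by omega
    rw [PySem.List.pyRange_one_cons (by exact_mod_cast hklt)]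
    simp only [List.foldl_cons]
    have hdrop : arr.drop k = arr[k] :: arr.drop (k + 1) := List.drop_eq_getElem_cons hklt
    have hlenpre : ((arr.take k).mapIdx (pvF a b)).length = k := by
      simp [Nat.min_eq_left hklt.le]
    rw [hdrop, pvMod2, pvGet_mid _ _ _ _ _ hlenpre]
    have hih := ih (k + 1) (by omega) (by omega)
    have hcast : ((k : Int) + 1) = ((k + 1 : Nat) : Int) := by push_cast; ring
    by_cases hp : k % 2 = 1
    · rw [if_pos (by simp [hp]), pvSet_mid _ _ _ _ _ hlenpre]
      have : (arr.take k).mapIdx (pvF a b) ++ PySem.Str.strip (PySem.Str.replace arr[k] a b) :: arr.drop (k + 1)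
          = (arr.take (k + 1)).mapIdx (pvF a b) ++ arr.drop (k + 1) := by
        rw [pvMapIdx_take_succ arr a b k hklt, pvF_odd a b k _ hp]
        simp
      rw [this, hcast, hih]
    · rw [if_neg (by simp [hp]), pvSet_mid _ _ _ _ _ hlenpre]
      have : (arr.take k).mapIdx (pvF a b) ++ PySem.Str.strip arr[k] :: arr.drop (k + 1)
          = (arr.take (k + 1)).mapIdx (pvF a b) ++ arr.drop (k + 1) := by
        rw [pvMapIdx_take_succ arr a b k hklt, pvF_even a b k _ (by omega)]
        simp
      rw [this, hcast, hih]

theorem pvGetNat (arr : List String) (d : String) (k : Nat) (hk : k < arr.length) :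
    PySem.List.pyGetD arr (k : Int) d = arr[k] := by
  simp [PySem.List.pyGetD_natCast, List.getD, List.getElem?_eq_getElem hk]

theorem pvB_loop (arr : List String) (a b : String) (n : Nat) :
    ∀ (k : Nat), k ≤ arr.length → k % 2 = 0 → arr.length - k = n →
    replaceOddsAltLoop arr a b ((arr.take k).mapIdx (pvF a b)) (k : Int)
      = arr.mapIdx (pvF a b) := by
  induction n using Nat.strong_induction_on with
  | _ n ih =>
    intro k hk hpar hn
    rw [replaceOddsAltLoop]
    by_cases h2 : k + 1 < arr.length
    · rw [if_pos (by simp only [PySem.List.len_eq]; omega)]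
      have hcast : ((k : Int) + 1) = ((k + 1 : Nat) : Int) := by push_cast; ring
      have hcast2 : ((k : Int) + 2) = ((k + 2 : Nat) : Int) := by push_cast; ring
      rw [hcast, hcast2, pvGetNat arr "" k (by omega), pvGetNat arr "" (k + 1) h2]
      have hout : (arr.take k).mapIdx (pvF a b)
            ++ [PySem.Str.strip arr[k], PySem.Str.strip (PySem.Str.replace arr[k + 1] a b)]
          = (arr.take (k + 2)).mapIdx (pvF a b) := by
        rw [show k + 2 = (k + 1) + 1 from rfl,
            pvMapIdx_take_succ arr a b (k + 1) h2,
            pvMapIdx_take_succ arr a b k (by omega),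
            pvF_even a b k _ hpar, pvF_odd a b (k + 1) _ (by omega)]
        simp
      rw [hout]
      exact ih (n - 2) (by omega) (k + 2) (by omega) (by omega) (by omega)
    · rw [if_neg (by simp only [PySem.List.len_eq]; omega)]
      by_cases h1 : k < arr.length
      · rw [if_pos (by simp only [PySem.List.len_eq]; exact_mod_cast h1)]
        rw [pvGetNat arr "" k h1, ← pvF_even a b k _ hpar,
            ← pvMapIdx_take_succ arr a b k h1,
            show k + 1 = arr.length by omega, List.take_length]
      · rw [if_neg (by simp only [PySem.List.len_eq]; omega)]
        have : k = arr.length := by omega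
        rw [this, List.take_length]

-- ===== VERDICT (by name: the statement is the Claim_ definition above) =====
theorem replaceOdds_spec : Claim_equal_replaceOdds := by
  intro arr a b _
  unfold Spec_replaceOdds replaceOdds replaceOdds_alt
  have hA := pvA_loop arr a b 0 (Nat.zero_le _)
  have hB := pvB_loop arr a b arr.length 0 (Nat.zero_le _) rfl rfl
  simp only [List.take_zero, List.mapIdx_nil, List.drop_zero, List.nil_append,
    Int.natCast_zero] at hA hB
  simp only [PySem.List.len_eq]
  rw [hA, hB]
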